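-- pv_equiv track=rewrite | github.com/olga-bessonova/blind75 | consonant_cancel/consonant_cancel4.py | word_changer
-- ===== SOURCE A (Python) =====
-- def word_changer(word):
--   vowels = 'aeiou'
--   for i in range(len(word)):
--     if word[i] in vowels:
--       return word[i:]
--     else:
--       i += 1
--   return ''
-- ===== SOURCE B (Python) =====
-- def word_changer(word):
--   hits = [p for p in (word.find(v) for v in 'aeiou') if p != -1]
--   return word[min(hits):] if hits else ''
-- ===== Notes on version B (the rewrite author's own statement) =====
-- stated objective: alternative
-- what changed: Instead of scanning characters left to right and testing each against the vowel string, B computes word.find(v) for each of the five vowels, keeps the hits, and slices from their minimum (no hit -> '').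
import Mathlib
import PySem

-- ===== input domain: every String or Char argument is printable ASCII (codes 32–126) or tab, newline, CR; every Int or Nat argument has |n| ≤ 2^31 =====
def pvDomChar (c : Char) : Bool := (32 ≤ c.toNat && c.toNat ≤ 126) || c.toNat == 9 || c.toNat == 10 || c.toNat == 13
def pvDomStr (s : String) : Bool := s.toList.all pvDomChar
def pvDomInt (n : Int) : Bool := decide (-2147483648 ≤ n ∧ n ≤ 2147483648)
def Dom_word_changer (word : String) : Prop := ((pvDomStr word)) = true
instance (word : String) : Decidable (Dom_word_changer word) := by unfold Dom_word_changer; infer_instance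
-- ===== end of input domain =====

-- B replaces A's left-to-right character scan by five word.find(vowel) searches plus a minimum (alternative decomposition, same result).

-- ===== PORT A =====
-- word[i], a 1-char string (i is in range inside the loop)
def wcCharStr (c? : Option Char) : String :=
  match c? with
  | some c => String.ofList [c]
  | none => ""

-- the 'for i in range(len(word))' loop with its early return
def wcLoop (word : String) (i : Nat) : String :=
  if h : i < word.toList.length then
    if PySem.Str.isIn (wcCharStr (PySem.Str.pyGet? word (i : Int))) "aeiou" then
      PySem.Str.slice word (some (i : Int)) none
    else wcLoop word (i + 1)
  else ""
termination_by word.toList.length - i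
decreasing_by simp only [String.length_toList] at h ⊢; omega

def word_changer (word : String) : String := wcLoop word 0

-- ===== PORT B =====
-- hits = [p for p in (word.find(v) for v in 'aeiou') if p != -1]
def wcFinds (word : String) : List Int :=
  ((["a", "e", "i", "o", "u"].map (fun v => PySem.Str.find word v)).filter (fun p => p != -1))

def word_changer_alt (word : String) : String :=
  let hits := wcFinds word
  if hits ≠ [] then
    match PySem.List.min? hits (fun x => x) with
    | some m => PySem.Str.slice word (some m) none
    | none => ""
  else ""

-- ===== PRECONDITION & SPEC =====
def Spec_word_changer (word : String) (out : String) : Prop := out = word_changer_alt word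
instance (word : String) (out : String) : Decidable (Spec_word_changer word out) := by unfold Spec_word_changer; infer_instance

-- ===== CLAIM (what is proved, stated in full; the proofs are below) =====
def Claim_equal_word_changer : Prop := ∀ (word : String), Dom_word_changer word → Spec_word_changer word (word_changer word)

-- ===== LEMMAS AND PROOFS =====

def wcIsVowel (c : Char) : Bool := c ∈ (['a', 'e', 'i', 'o', 'u'] : List Char)

lemma singleton_prefix_iff (c : Char) (xs : List Char) : [c] <+: xs ↔ xs.head? = some c := by
  cases xs with
  | nil => simp
  | cons a t => simp [List.cons_prefix_cons, eq_comm]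

lemma slice_from_nat (word : String) (k : Nat) :
    PySem.Str.slice word (some (k : Int)) none = String.ofList (word.toList.drop k) := by
  conv_lhs => rw [← String.ofList_toList (s := PySem.Str.slice word (some (k : Int)) none)]
  rw [PySem.Str.toList_slice, PySem.Chars.slice_eq_listSlice, PySem.List.slice_from_natCast]

lemma isIn_vowels (c : Char) :
    PySem.Str.isIn (String.ofList [c]) "aeiou" = wcIsVowel c := by
  have h1 : PySem.Str.isIn (String.ofList [c]) "aeiou" = true ↔
      c ∈ (['a', 'e', 'i', 'o', 'u'] : List Char) := by
    rw [PySem.Str.isIn_iff_infix]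
    simpa using List.singleton_infix_iff c ("aeiou").toList
  cases hb : wcIsVowel c
  · simp only [wcIsVowel, decide_eq_false_iff_not] at hb
    exact Bool.eq_false_iff.mpr (fun hcon => hb (h1.mp hcon))
  · simp only [wcIsVowel, decide_eq_true_eq] at hb
    exact h1.mpr hb

lemma wcLoop_eq (word : String) (i : Nat) (hi : i ≤ word.toList.length) :
    wcLoop word i =
      String.ofList (List.drop (i + List.findIdx wcIsVowel (word.toList.drop i)) word.toList) := by
  by_cases h : i < word.toList.length
  · rw [wcLoop, dif_pos h]
    have hget : PySem.Str.pyGet? word (i : Int) = some (word.toList[i]'h) := by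
      rw [PySem.Str.pyGet?_eq, PySem.Chars.pyGet?_eq_listPyGet?, PySem.List.pyGet?_natCast]
      simp
    rw [hget]
    simp only [wcCharStr, isIn_vowels]
    have hdrop : word.toList.drop i = word.toList[i]'h :: word.toList.drop (i + 1) :=
      List.drop_eq_getElem_cons h
    by_cases hv : wcIsVowel (word.toList[i]'h) = true
    · rw [if_pos hv]
      have h0 : List.findIdx wcIsVowel (word.toList.drop i) = 0 := by
        rw [hdrop, List.findIdx_cons, hv]
        simp
      rw [h0, slice_from_nat]
      simp
    · rw [if_neg hv]
      rw [wcLoop_eq word (i + 1) h]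
      have h1 : List.findIdx wcIsVowel (word.toList.drop i) =
          List.findIdx wcIsVowel (word.toList.drop (i + 1)) + 1 := by
        rw [hdrop, List.findIdx_cons]
        simp [hv]
      rw [h1]
      have h2 : i + 1 + List.findIdx wcIsVowel (word.toList.drop (i + 1)) =
          i + (List.findIdx wcIsVowel (word.toList.drop (i + 1)) + 1) := by omega
      rw [h2]
  · have hieq : i = word.toList.length := by omega
    rw [wcLoop, dif_neg h, hieq]
    simp
termination_by word.toList.length - i
decreasing_by simp only [String.length_toList] at h ⊢; omega

lemma find_single_char (word : String) (v : Char) :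
    (PySem.Str.find word (String.ofList [v]) = -1 ∧ v ∉ word.toList) ∨
      (∃ k : Nat, PySem.Str.find word (String.ofList [v]) = (k : Int) ∧
        word.toList[k]? = some v ∧ ∀ i < k, word.toList[i]? ≠ some v) := by
  have hb : PySem.Str.find word (String.ofList [v]) = PySem.Chars.find word.toList [v] := by
    rw [PySem.Str.find_eq]
    simp
  by_cases h : PySem.Chars.find word.toList [v] = -1
  · left
    refine ⟨by rw [hb, h], ?_⟩
    have := (PySem.Chars.find_eq_neg_one_iff word.toList [v]).mp h
    rw [List.singleton_infix_iff] at this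
    exact this
  · right
    have h0 : 0 ≤ PySem.Chars.find word.toList [v] := by
      have := PySem.Chars.neg_one_le_find word.toList [v]
      omega
    obtain ⟨hpre, hmin⟩ := PySem.Chars.find_spec h0
    refine ⟨(PySem.Chars.find word.toList [v]).toNat, by rw [hb]; omega, ?_, ?_⟩
    · have := (singleton_prefix_iff v _).mp hpre
      rwa [List.head?_drop] at this
    · intro i hik hcontr
      apply hmin i hik
      rw [singleton_prefix_iff, List.head?_drop]
      exact hcontr

lemma vowel_char_cases (c : Char) (h : wcIsVowel c) :
    String.ofList [c] ∈ (["a", "e", "i", "o", "u"] : List String) := by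
  simp only [wcIsVowel, decide_eq_true_eq, List.mem_cons, List.not_mem_nil, or_false] at h
  rcases h with rfl | rfl | rfl | rfl | rfl <;> decide

lemma str_of_five (v : String) (h : v ∈ (["a", "e", "i", "o", "u"] : List String)) :
    ∃ c : Char, v = String.ofList [c] ∧ wcIsVowel c := by
  simp only [List.mem_cons, List.not_mem_nil, or_false] at h
  rcases h with rfl | rfl | rfl | rfl | rfl
  · exact ⟨'a', by decide, by decide⟩
  · exact ⟨'e', by decide, by decide⟩
  · exact ⟨'i', by decide, by decide⟩
  · exact ⟨'o', by decide, by decide⟩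
  · exact ⟨'u', by decide, by decide⟩

lemma mem_wcFinds (word : String) (m : Int) :
    m ∈ wcFinds word ↔
      (∃ v ∈ (["a", "e", "i", "o", "u"] : List String),
        PySem.Str.find word v = m) ∧ m ≠ -1 := by
  simp only [wcFinds, List.mem_filter, List.mem_map, bne_iff_ne, ne_eq]

lemma alt_eq (word : String) :
    word_changer_alt word =
      String.ofList (List.drop (List.findIdx wcIsVowel word.toList) word.toList) := by
  by_cases hex : ∃ c ∈ word.toList, wcIsVowel c
  · have hj : List.findIdx wcIsVowel word.toList < word.toList.length :=
      List.findIdx_lt_length.mpr hex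
    have hcj : wcIsVowel (word.toList[List.findIdx wcIsVowel word.toList]'hj) = true :=
      List.findIdx_getElem
    -- the first vowel index is itself one of the computed finds
    have hjmem : ((List.findIdx wcIsVowel word.toList : Nat) : Int) ∈ wcFinds word := by
      rw [mem_wcFinds]
      refine ⟨⟨String.ofList [word.toList[List.findIdx wcIsVowel word.toList]'hj],
        vowel_char_cases _ hcj, ?_⟩, by omega⟩
      rcases find_single_char word (word.toList[List.findIdx wcIsVowel word.toList]'hj) with
        ⟨_, hnmem⟩ | ⟨k, hfk, hk, hmin⟩
      · exact absurd (List.getElem_mem hj) hnmem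
      · have hkj : k = List.findIdx wcIsVowel word.toList := by
          rcases List.getElem?_eq_some_iff.mp hk with ⟨hklt, hkv⟩
          have h1 : ¬ k < List.findIdx wcIsVowel word.toList := by
            intro hlt
            have hfalse : wcIsVowel (word.toList[k]'hklt) = false :=
              List.not_of_lt_findIdx hlt
            rw [hkv] at hfalse
            have : (false : Bool) = true := by rw [← hfalse]; exact hcj
            exact Bool.false_ne_true this
          have h2 : ¬ List.findIdx wcIsVowel word.toList < k := by
            intro hlt
            exact hmin _ hlt (List.getElem?_eq_some_iff.mpr ⟨hj, rfl⟩)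
          omega
        rw [hfk, hkj]
    -- every hit is at least the first vowel index
    have hlow : ∀ m ∈ wcFinds word, ((List.findIdx wcIsVowel word.toList : Nat) : Int) ≤ m := by
      intro m hm
      rw [mem_wcFinds] at hm
      obtain ⟨⟨v, hv5, hvm⟩, hne⟩ := hm
      obtain ⟨c, rfl, hcv⟩ := str_of_five v hv5
      rcases find_single_char word c with ⟨hm1, _⟩ | ⟨k, hfk, hk, _⟩
      · exact absurd (hvm ▸ hm1) hne
      · rcases List.getElem?_eq_some_iff.mp hk with ⟨hklt, hkv⟩
        have hjk : List.findIdx wcIsVowel word.toList ≤ k := by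
          by_contra hcon
          have hfalse : wcIsVowel (word.toList[k]'hklt) = false :=
            List.not_of_lt_findIdx (by omega : k < List.findIdx wcIsVowel word.toList)
          rw [hkv, hcv] at hfalse
          exact absurd hfalse (by decide)
        rw [← hvm, hfk]
        omega
    have hne : wcFinds word ≠ [] := by
      intro hnil
      rw [hnil] at hjmem
      exact List.not_mem_nil hjmem
    obtain ⟨m, hm⟩ : ∃ m, PySem.List.min? (wcFinds word) (fun x => x) = some m := by
      cases hmin : PySem.List.min? (wcFinds word) (fun x => x) with
      | none => exact absurd ((PySem.List.min?_eq_none_iff _ _).mp hmin) hne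
      | some m => exact ⟨m, rfl⟩
    have h1 := hlow m (PySem.List.min?_mem hm)
    have h2 := PySem.List.min?_isMin hm _ hjmem
    have hmj : m = ((List.findIdx wcIsVowel word.toList : Nat) : Int) := le_antisymm h2 h1
    unfold word_changer_alt
    simp only [if_pos hne, hm, hmj]
    exact slice_from_nat word _
  · have hfinds : wcFinds word = [] := by
      rw [List.eq_nil_iff_forall_not_mem]
      intro m hm
      rw [mem_wcFinds] at hm
      obtain ⟨⟨v, hv5, hvm⟩, hne⟩ := hm
      obtain ⟨c, rfl, hcv⟩ := str_of_five v hv5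
      rcases find_single_char word c with ⟨hm1, _⟩ | ⟨k, hfk, hk, _⟩
      · exact hne (hvm ▸ hm1)
      · rcases List.getElem?_eq_some_iff.mp hk with ⟨hklt, hkv⟩
        exact hex ⟨c, hkv ▸ List.getElem_mem hklt, hcv⟩
    have hlen : List.findIdx wcIsVowel word.toList = word.toList.length := by
      have hle := List.findIdx_le_length (p := wcIsVowel) (xs := word.toList)
      rcases Nat.lt_or_ge (List.findIdx wcIsVowel word.toList) word.toList.length with hlt | hge
      · exact absurd (List.findIdx_lt_length.mp hlt) hex
      · omega
    unfold word_changer_alt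
    simp [hfinds, hlen]

-- ===== VERDICT (by name: the statement is the Claim_ definition above) =====
theorem word_changer_spec : Claim_equal_word_changer := by
  intro word _
  unfold Spec_word_changer
  rw [alt_eq, word_changer, wcLoop_eq word 0 (Nat.zero_le _)]
  simp
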